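-- pv_equiv track=rewrite | github.com/shanyuzhe/AI_FullStack_Practice | python_gym/day1_Counter.py | solve
-- ===== SOURCE A (Python) =====
-- from collections import Counter, defaultdict, deque
--
-- def solve(shop_shoes, customers) -> None:
--     shoe_count = Counter(shop_shoes)
--     sum = 0
--     for size, price in customers:
--         if shoe_count[size] > 0:
--             sum += price
--             shoe_count[size] -= 1
--     return sum
-- ===== SOURCE B (Python) =====
-- def solve(shop_shoes, customers):
--     groups = {}
--     for size, price in customers:
--         groups[size] = groups.get(size, []) + [price]
--     total = 0
--     for size, prices in groups.items():
--         total += sum(prices[:shop_shoes.count(size)])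
--     return total
-- ===== Notes on version B (the rewrite author's own statement) =====
-- stated objective: alternative
-- what changed: Replaces the inline counter-depletion pass with a group-then-prefix scheme: prices are grouped per size in arrival order and, per distinct size, the first count(size) prices are summed.
import Mathlib
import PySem

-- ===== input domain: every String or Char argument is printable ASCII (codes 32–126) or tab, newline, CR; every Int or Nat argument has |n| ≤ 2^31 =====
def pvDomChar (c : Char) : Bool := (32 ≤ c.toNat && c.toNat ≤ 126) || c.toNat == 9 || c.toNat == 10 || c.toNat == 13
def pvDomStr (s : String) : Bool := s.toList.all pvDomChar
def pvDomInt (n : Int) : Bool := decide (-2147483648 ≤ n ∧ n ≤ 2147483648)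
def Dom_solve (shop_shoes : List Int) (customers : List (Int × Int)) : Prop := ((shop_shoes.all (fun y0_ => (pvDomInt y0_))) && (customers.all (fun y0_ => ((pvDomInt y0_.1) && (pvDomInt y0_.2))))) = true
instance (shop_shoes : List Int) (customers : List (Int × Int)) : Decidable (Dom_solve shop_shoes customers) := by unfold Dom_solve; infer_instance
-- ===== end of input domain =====

-- B replaces A's inline counter-depletion pass by grouping prices per size in arrival
-- order and summing, for each distinct size, the first count(size) prices (alternative decomposition).


-- ===== PORT A =====
-- shoe_count = Counter(shop_shoes); for size, price: if shoe_count[size] > 0: sum += price; shoe_count[size] -= 1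
def solve (shop_shoes : List Int) (customers : List (Int × Int)) : Int :=
  (customers.foldl
    (fun st c =>
      if st.1.getD c.1 0 > 0 then (st.1.insert c.1 (st.1.getD c.1 0 - 1), st.2 + c.2) else st)
    (PySem.Dict.counter shop_shoes, (0 : Int))).2

-- ===== PORT B =====
-- groups[size] = groups.get(size, []) + [price]; then total += sum(prices[:shop_shoes.count(size)]) over groups.items()
def solve_alt (shop_shoes : List Int) (customers : List (Int × Int)) : Int :=
  let groups := customers.foldl (fun d p => d.modify p.1 [] (fun v => v ++ [p.2])) PySem.Dict.empty
  groups.items.foldl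
    (fun total kv =>
      total + (PySem.List.slice kv.2 none (some ((PySem.List.count shop_shoes kv.1 : Nat) : Int))).sum)
    0

-- ===== PRECONDITION & SPEC =====
def Spec_solve (shop_shoes : List Int) (customers : List (Int × Int)) (out : Int) : Prop := out = solve_alt shop_shoes customers
instance (shop_shoes : List Int) (customers : List (Int × Int)) (out : Int) : Decidable (Spec_solve shop_shoes customers out) := by unfold Spec_solve; infer_instance

-- ===== CLAIM (what is proved, stated in full; the proofs are below) =====
def Claim_equal_solve : Prop := ∀ (shop_shoes : List Int) (customers : List (Int × Int)), Dom_solve shop_shoes customers → Spec_solve shop_shoes customers (solve shop_shoes customers)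

-- ===== LEMMAS AND PROOFS =====

-- prices of customers with size s, in arrival order
def pricesOf (s : Int) (cs : List (Int × Int)) : List Int :=
  (cs.filter (fun p => p.1 == s)).map (fun p => p.2)

-- abstract form of A's loop: counter lookup function c, served sum
def serve (c : Int → Int) : List (Int × Int) → Int
  | [] => 0
  | (s, p) :: rest =>
    if c s > 0 then p + serve (fun t => if t = s then c s - 1 else c t) rest
    else serve c rest

lemma pricesOf_cons (t s : Int) (p : Int) (rest : List (Int × Int)) :
    pricesOf t ((s, p) :: rest) = if s = t then p :: pricesOf t rest else pricesOf t rest := by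
  simp [pricesOf, List.filter_cons]
  split_ifs with h
  · simp
  · simp

lemma pricesOf_not_mem (s : Int) (rest : List (Int × Int))
    (h : s ∉ rest.map Prod.fst) : pricesOf s rest = [] := by
  simp [pricesOf, List.filter_eq_nil_iff]
  intro a b hab hba
  exact h (hba ▸ List.mem_map_of_mem hab)

-- A's foldl over customers computes serve
lemma solve_foldl_eq_serve (cs : List (Int × Int)) :
    ∀ (d : PySem.Dict Int Int) (acc : Int),
      (cs.foldl
        (fun st c =>
          if st.1.getD c.1 0 > 0 then (st.1.insert c.1 (st.1.getD c.1 0 - 1), st.2 + c.2) else st)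
        (d, acc)).2 = acc + serve (fun s => d.getD s 0) cs := by
  induction cs with
  | nil => intro d acc; simp [serve]
  | cons hd tl ih =>
    intro d acc
    obtain ⟨s, p⟩ := hd
    by_cases h : d.getD s 0 > 0
    · simp only [List.foldl_cons, h, if_pos, serve]
      rw [ih]
      have hc : (fun t => (d.insert s (d.getD s 0 - 1)).getD t 0)
          = (fun t => if t = s then d.getD s 0 - 1 else d.getD t 0) := by
        funext t
        rw [PySem.Dict.getD_insert]
      rw [hc]
      ring
    · simp only [List.foldl_cons, h, serve, if_false]
      exact ih d acc

-- splitting the per-size Finset sum at one size s, for two lookups agreeing off s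
lemma sum_split (rest : List (Int × Int)) (s : Int) (c' c : Int → Int)
    (hagree : ∀ t, t ≠ s → c' t = c t) :
    ∑ t ∈ (rest.map Prod.fst).toFinset, ((pricesOf t rest).take (c' t).toNat).sum
      = ((pricesOf s rest).take (c' s).toNat).sum
        + ∑ t ∈ ((rest.map Prod.fst).toFinset).erase s, ((pricesOf t rest).take (c t).toNat).sum := by
  by_cases hs : s ∈ (rest.map Prod.fst).toFinset
  · rw [← Finset.add_sum_erase _ _ hs]
    congr 1
    refine Finset.sum_congr rfl (fun t ht => ?_)
    rw [hagree t (Finset.ne_of_mem_erase ht)]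
  · rw [Finset.erase_eq_self.mpr hs]
    rw [pricesOf_not_mem s rest (by simpa using hs)]
    simp only [List.take_nil, List.sum_nil, zero_add]
    refine Finset.sum_congr rfl (fun t ht => ?_)
    rw [hagree t (fun he => hs (he ▸ ht))]

-- serve equals the group-then-prefix sum
lemma serve_eq_sum (cs : List (Int × Int)) :
    ∀ c : Int → Int,
      serve c cs = ∑ s ∈ (cs.map Prod.fst).toFinset, ((pricesOf s cs).take (c s).toNat).sum := by
  induction cs with
  | nil => intro c; simp [serve]
  | cons hd tl ih =>
    intro c
    obtain ⟨s, p⟩ := hd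
    have hkey : (((s, p) :: tl).map Prod.fst).toFinset = insert s (tl.map Prod.fst).toFinset := by
      simp
    rw [hkey, ← Finset.add_sum_erase _ _ (Finset.mem_insert_self s _),
        Finset.erase_insert_eq_erase]
    have hself : pricesOf s ((s, p) :: tl) = p :: pricesOf s tl := by
      rw [pricesOf_cons]; simp
    have hother : ∀ t ∈ ((tl.map Prod.fst).toFinset).erase s,
        ((pricesOf t ((s, p) :: tl)).take (c t).toNat).sum
          = ((pricesOf t tl).take (c t).toNat).sum := by
      intro t ht
      rw [pricesOf_cons, if_neg (fun he => (Finset.ne_of_mem_erase ht) he.symm)]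
    rw [Finset.sum_congr rfl hother, hself]
    by_cases h : c s > 0
    · simp only [serve, h, if_pos]
      rw [ih, sum_split tl s (fun t => if t = s then c s - 1 else c t) c
            (fun t ht => by simp [ht])]
      have htn : (c s).toNat = ((c s - 1).toNat) + 1 := by omega
      rw [htn, List.take_succ_cons, List.sum_cons]
      simp only [if_pos trivial]
      ring_nf
    · simp only [serve, h, if_false]
      rw [ih, sum_split tl s c c (fun _ _ => rfl)]
      have htn : (c s).toNat = 0 := by omega
      rw [htn]
      simp

-- B computes the same group-then-prefix sum
lemma solve_alt_eq_sum (shop : List Int) (cs : List (Int × Int)) :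
    solve_alt shop cs
      = ∑ s ∈ (cs.map Prod.fst).toFinset,
          ((pricesOf s cs).take (List.count s shop)).sum := by
  have hrfl : solve_alt shop cs
      = (cs.foldl (fun d p => d.modify p.1 [] (fun v => v ++ [p.2])) PySem.Dict.empty).items.foldl
          (fun total kv =>
            total + (PySem.List.slice kv.2 none (some ((PySem.List.count shop kv.1 : Nat) : Int))).sum)
          0 := rfl
  rw [hrfl]
  set groups := cs.foldl (fun d p => d.modify p.1 [] (fun v => v ++ [p.2])) PySem.Dict.empty with hg
  have hnodup : groups.keys.Nodup := by
    rw [hg]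
    exact PySem.Dict.nodup_keys_foldl_modify_key cs Prod.fst [] (fun _ p v => v ++ [p.2]) _
      (by simp)
  have hkeys : groups.keys = PySem.Set.ofList (cs.map Prod.fst) := by
    rw [hg, PySem.Dict.keys_foldl_modify_key cs Prod.fst [] (fun _ p v => v ++ [p.2])]
    simp [PySem.Set.ofList_eq_foldl, PySem.Set.update, PySem.Dict.keys_empty]
  have hget : ∀ k, groups.getD k [] = pricesOf k cs := by
    intro k
    rw [hg, PySem.Dict.getD_foldl_modify_append]
    simp [pricesOf, PySem.Dict.getD_empty]
  simp only [PySem.List.foldl_add]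
  rw [PySem.Dict.items_eq_map_keys groups hnodup []]
  rw [List.map_map]
  have hmap : ∀ k,
      ((fun kv : Int × List Int =>
          (PySem.List.slice kv.2 none (some ((PySem.List.count shop kv.1 : Nat) : Int))).sum) ∘
        (fun k => (k, groups.getD k []))) k
      = ((pricesOf k cs).take (List.count k shop)).sum := by
    intro k
    simp only [Function.comp, hget, PySem.List.slice_to_natCast, PySem.List.count_eq]
  rw [List.map_congr_left (fun k _ => hmap k), hkeys]
  have hnodupK : (PySem.Set.ofList (cs.map Prod.fst)).Nodup := hkeys ▸ hnodup
  have hfin : (PySem.Set.ofList (cs.map Prod.fst)).toFinset = (cs.map Prod.fst).toFinset := by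
    apply Finset.ext
    intro a
    simp [List.mem_toFinset, PySem.Set.mem_ofList]
  rw [← List.sum_toFinset _ hnodupK, hfin]
  exact zero_add _

-- ===== VERDICT (by name: the statement is the Claim_ definition above) =====
theorem solve_spec : Claim_equal_solve := by
  intro shop cs _
  unfold Spec_solve
  unfold solve
  rw [solve_foldl_eq_serve, serve_eq_sum, solve_alt_eq_sum]
  simp only [PySem.Dict.getD_counter, Int.toNat_natCast]
  exact zero_add _
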